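-- pv_equiv track=rewrite | github.com/cratpij/logslice | logslice/diff.py | diff_by_field
-- ===== SOURCE A (Python) =====
-- def diff_by_field(
--     left: list[dict], right: list[dict], key: str
-- ) -> dict[str, list[dict]]:
--     """Return records only in left, only in right, and in both (by key value)."""
--     left_index = {r[key]: r for r in left if key in r}
--     right_index = {r[key]: r for r in right if key in r}
--
--     left_keys = set(left_index)
--     right_keys = set(right_index)
--
--     return {
--         "only_left": [left_index[k] for k in sorted(left_keys - right_keys)],
--         "only_right": [right_index[k] for k in sorted(right_keys - left_keys)],
--         "in_both": [left_index[k] for k in sorted(left_keys & right_keys)],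
--     }
-- ===== SOURCE B (Python) =====
-- def diff_by_field(
--     left: list[dict], right: list[dict], key: str
-- ) -> dict[str, list[dict]]:
--     """Sorted-merge diff: sort each side's (key, record) items, then a
--     two-pointer merge classifies keys into only_left / only_right / in_both."""
--
--     def sorted_items(rs):
--         idx = {}
--         for r in rs:
--             if key in r:
--                 idx[r[key]] = r
--         return sorted(idx.items(), key=lambda kv: kv[0])
--
--     L = sorted_items(left)
--     R = sorted_items(right)
--     only_left, only_right, in_both = [], [], []
--     i = j = 0
--     while i < len(L) and j < len(R):
--         kl, rl = L[i]
--         kr, rr = R[j]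
--         if kl < kr:
--             only_left.append(rl)
--             i += 1
--         elif kr < kl:
--             only_right.append(rr)
--             j += 1
--         else:
--             in_both.append(rl)
--             i += 1
--             j += 1
--     only_left.extend(r for _, r in L[i:])
--     only_right.extend(r for _, r in R[j:])
--     return {"only_left": only_left, "only_right": only_right, "in_both": in_both}
-- ===== Notes on version B (the rewrite author's own statement) =====
-- stated objective: alternative
-- what changed: Replaces A's three set operations (two differences, one intersection) each followed by its own sort with a sorted-merge: each side's (key, record) items are sorted once and a two-pointer merge classifies every key into only_left / only_right / in_both in a single linear pass.
import Mathlib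
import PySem

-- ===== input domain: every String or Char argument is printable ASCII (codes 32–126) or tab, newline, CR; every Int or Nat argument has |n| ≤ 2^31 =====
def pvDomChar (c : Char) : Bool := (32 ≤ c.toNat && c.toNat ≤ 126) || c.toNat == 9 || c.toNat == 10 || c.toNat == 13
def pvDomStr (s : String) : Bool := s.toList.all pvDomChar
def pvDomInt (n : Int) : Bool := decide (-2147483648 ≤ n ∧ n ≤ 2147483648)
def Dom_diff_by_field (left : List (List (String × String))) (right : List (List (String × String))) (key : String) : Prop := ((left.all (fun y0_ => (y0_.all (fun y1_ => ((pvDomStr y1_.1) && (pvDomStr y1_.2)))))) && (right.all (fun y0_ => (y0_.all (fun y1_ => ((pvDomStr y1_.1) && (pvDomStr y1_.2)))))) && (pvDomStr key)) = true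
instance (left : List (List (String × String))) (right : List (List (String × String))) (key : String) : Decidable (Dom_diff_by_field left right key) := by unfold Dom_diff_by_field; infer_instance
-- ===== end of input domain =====

-- B replaces A's three set operations + three sorts by sorting each side's (key, record) items once and classifying keys with a two-pointer merge; same result, same cost (objective: alternative).


-- ===== PORT A =====
-- shared helper: the identical key→record indexing both Pythons contain
-- (A: '{r[key]: r for r in rs if key in r}'; B: the same filter/last-wins loop)
def pvBuildIndex (rs : List (List (String × String))) (key : String) : PySem.Dict String (List (String × String)) :=
  rs.foldl (fun d r =>
    let rd := PySem.Dict.ofList r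
    if rd.contains key then d.insert (rd.getD key "") r else d) PySem.Dict.empty

def diff_by_field (left : List (List (String × String))) (right : List (List (String × String))) (key : String) : List (String × List (List (String × String))) :=
  let left_index := pvBuildIndex left key
  let right_index := pvBuildIndex right key
  let left_keys : PySem.Set String := PySem.Set.ofList left_index.keys
  let right_keys : PySem.Set String := PySem.Set.ofList right_index.keys
  [("only_left", (PySem.List.sorted (PySem.Set.diff left_keys right_keys) (fun x => x) false).map (fun k => left_index.getD k [])),
   ("only_right", (PySem.List.sorted (PySem.Set.diff right_keys left_keys) (fun x => x) false).map (fun k => right_index.getD k [])),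
   ("in_both", (PySem.List.sorted (PySem.Set.inter left_keys right_keys) (fun x => x) false).map (fun k => left_index.getD k []))]

-- ===== PORT B =====
-- B's two-pointer while loop, as the obvious structural recursion on the two sorted lists
def pvMerge (L R : List (String × List (String × String))) :
    List (List (String × String)) × List (List (String × String)) × List (List (String × String)) :=
  match L, R with
  | [], R => ([], R.map (·.2), [])
  | l :: L', [] => ((l :: L').map (·.2), [], [])
  | (kl, rl) :: L', (kr, rr) :: R' =>
    if kl < kr then
      let res := pvMerge L' ((kr, rr) :: R')
      (rl :: res.1, res.2.1, res.2.2)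
    else if kr < kl then
      let res := pvMerge ((kl, rl) :: L') R'
      (res.1, rr :: res.2.1, res.2.2)
    else
      let res := pvMerge L' R'
      (res.1, res.2.1, rl :: res.2.2)
termination_by L.length + R.length
decreasing_by all_goals simp <;> omega

def diff_by_field_alt (left : List (List (String × String))) (right : List (List (String × String))) (key : String) : List (String × List (List (String × String))) :=
  let L := PySem.List.sorted (pvBuildIndex left key).items (fun kv => kv.1) false
  let R := PySem.List.sorted (pvBuildIndex right key).items (fun kv => kv.1) false
  let res := pvMerge L R
  [("only_left", res.1), ("only_right", res.2.1), ("in_both", res.2.2)]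

-- ===== PRECONDITION & SPEC =====
def Spec_diff_by_field (left : List (List (String × String))) (right : List (List (String × String))) (key : String) (out : List (String × List (List (String × String)))) : Prop := out = diff_by_field_alt left right key
instance (left : List (List (String × String))) (right : List (List (String × String))) (key : String) (out : List (String × List (List (String × String)))) : Decidable (Spec_diff_by_field left right key out) := by unfold Spec_diff_by_field; infer_instance

-- ===== CLAIM (what is proved, stated in full; the proofs are below) =====
def Claim_equal_diff_by_field : Prop := ∀ (left : List (List (String × String))) (right : List (List (String × String))) (key : String), Dom_diff_by_field left right key → Spec_diff_by_field left right key (diff_by_field left right key)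

-- ===== LEMMAS AND PROOFS =====

-- the index built by both programs has pairwise-distinct keys
theorem pvNodupKeys (rs : List (List (String × String))) (key : String) :
    (pvBuildIndex rs key).keys.Nodup := by
  unfold pvBuildIndex
  have h : ∀ (d : PySem.Dict String (List (String × String))), d.keys.Nodup →
      (rs.foldl (fun d r =>
        let rd := PySem.Dict.ofList r
        if rd.contains key then d.insert (rd.getD key "") r else d) d).keys.Nodup := by
    induction rs with
    | nil => intro d hd; simpa using hd
    | cons r t ih =>
      intro d hd
      simp only [List.foldl_cons]
      split
      · exact ih _ (PySem.Dict.nodup_keys_insert _ _ _ hd)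
      · exact ih _ hd
  exact h _ (by simp [PySem.Dict.empty])

-- the merge of two key-sorted item lists = the three filtered projections
theorem pvMergeSpec (L R : List (String × List (String × String)))
    (hL : (L.map Prod.fst).Pairwise (· < ·)) (hR : (R.map Prod.fst).Pairwise (· < ·)) :
    pvMerge L R = ((L.filter (fun p => decide (p.1 ∉ R.map Prod.fst))).map (·.2),
                   (R.filter (fun p => decide (p.1 ∉ L.map Prod.fst))).map (·.2),
                   (L.filter (fun p => decide (p.1 ∈ R.map Prod.fst))).map (·.2)) := by
  induction L, R using pvMerge.induct with
  | case1 R => simp [pvMerge]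
  | case2 l L' => simp [pvMerge]
  | case3 kl rl L' kr rr R' hlt ih =>
    simp only [List.map_cons, List.pairwise_cons] at hL hR
    have hRpw : (((kr, rr) :: R').map Prod.fst).Pairwise (· < ·) := by
      rw [List.map_cons]; exact List.pairwise_cons.mpr hR
    have hnotin : kl ∉ kr :: R'.map Prod.fst := by
      intro h
      rcases List.mem_cons.mp h with h | h
      · exact absurd h (ne_of_lt hlt)
      · exact absurd rfl (ne_of_lt (lt_trans hlt (hR.1 _ h)))
    have hRne : ∀ p ∈ (kr, rr) :: R', p.1 ≠ kl := by
      intro p hp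
      rcases List.mem_cons.mp hp with h | h
      · subst h; exact (ne_of_lt hlt).symm
      · exact (ne_of_lt (lt_trans hlt (hR.1 _ (List.mem_map_of_mem h)))).symm
    rw [pvMerge]
    simp only [if_pos hlt, ih hL.2 hRpw, List.map_cons]
    refine Prod.ext ?_ (Prod.ext ?_ ?_) <;> simp only
    · rw [List.filter_cons, if_pos (by exact decide_eq_true hnotin)]
      simp
    · congr 1
      apply List.filter_congr
      intro p hp
      simp [List.mem_cons, hRne p hp]
    · rw [List.filter_cons, if_neg (by simp [hnotin])]
  | case4 kl rl L' kr rr R' hnlt hlt ih =>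
    simp only [List.map_cons, List.pairwise_cons] at hL hR
    have hLpw : (((kl, rl) :: L').map Prod.fst).Pairwise (· < ·) := by
      rw [List.map_cons]; exact List.pairwise_cons.mpr hL
    have hnotin : kr ∉ kl :: L'.map Prod.fst := by
      intro h
      rcases List.mem_cons.mp h with h | h
      · exact absurd h (ne_of_lt hlt)
      · exact absurd rfl (ne_of_lt (lt_trans hlt (hL.1 _ h)))
    have hLne : ∀ p ∈ (kl, rl) :: L', p.1 ≠ kr := by
      intro p hp
      rcases List.mem_cons.mp hp with h | h
      · subst h; exact (ne_of_lt hlt).symm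
      · exact (ne_of_lt (lt_trans hlt (hL.1 _ (List.mem_map_of_mem h)))).symm
    rw [pvMerge]
    simp only [if_neg hnlt, if_pos hlt, ih hLpw hR.2, List.map_cons]
    refine Prod.ext ?_ (Prod.ext ?_ ?_) <;> simp only
    · congr 1
      apply List.filter_congr
      intro p hp
      simp [List.mem_cons, hLne p hp]
    · rw [List.filter_cons, if_pos (by exact decide_eq_true hnotin)]
      simp
    · congr 1
      apply List.filter_congr
      intro p hp
      simp [List.mem_cons, hLne p hp]
  | case5 kl rl L' kr rr R' hnlt hnlt' ih =>
    have heq : kl = kr := le_antisymm (not_lt.mp hnlt') (not_lt.mp hnlt)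
    subst heq
    simp only [List.map_cons, List.pairwise_cons] at hL hR
    have hLne : ∀ p ∈ L', p.1 ≠ kl :=
      fun p hp => (ne_of_lt (hL.1 _ (List.mem_map_of_mem hp))).symm
    have hRne : ∀ p ∈ R', p.1 ≠ kl :=
      fun p hp => (ne_of_lt (hR.1 _ (List.mem_map_of_mem hp))).symm
    rw [pvMerge]
    simp only [if_neg hnlt, ih hL.2 hR.2, List.map_cons]
    refine Prod.ext ?_ (Prod.ext ?_ ?_) <;> simp only
    · rw [List.filter_cons, if_neg (by simp)]
      congr 1
      apply List.filter_congr
      intro p hp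
      simp [List.mem_cons, hLne p hp]
    · rw [List.filter_cons, if_neg (by simp)]
      congr 1
      apply List.filter_congr
      intro p hp
      simp [List.mem_cons, hRne p hp]
    · rw [List.filter_cons, if_pos (by simp)]
      congr 1
      congr 1
      apply List.filter_congr
      intro p hp
      simp [List.mem_cons, hLne p hp]

-- B's sorted item list: its key column is a strictly increasing rearrangement of the dict's keys
theorem pvSortedItemsFstPerm (li : PySem.Dict String (List (String × String))) :
    ((PySem.List.sorted li.items (fun kv => kv.1) false).map Prod.fst).Perm li.keys :=
  (PySem.List.sorted_perm li.items (fun kv => kv.1) false).map Prod.fst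

theorem pvSortedItemsPairwise (li : PySem.Dict String (List (String × String)))
    (hnd : li.keys.Nodup) :
    ((PySem.List.sorted li.items (fun kv => kv.1) false).map Prod.fst).Pairwise (· < ·) := by
  have hle : ((PySem.List.sorted li.items (fun kv => kv.1) false).map Prod.fst).Pairwise (· ≤ ·) :=
    List.pairwise_map.mpr (PySem.List.sorted_pairwise li.items (fun kv => kv.1))
  have hnd' : ((PySem.List.sorted li.items (fun kv => kv.1) false).map Prod.fst).Nodup :=
    (pvSortedItemsFstPerm li).nodup_iff.mpr hnd
  exact (hle.and hnd').imp (fun h => lt_of_le_of_ne h.1 h.2)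

-- one bucket: filtering B's sorted item list equals A's sorted-key-set map
theorem pvBucket (li : PySem.Dict String (List (String × String)))
    (hnd : li.keys.Nodup) (q : String → Bool) (A : List String) (hA : A.Nodup)
    (hmem : ∀ k, k ∈ A ↔ k ∈ li.keys ∧ q k = true) :
    ((PySem.List.sorted li.items (fun kv => kv.1) false).filter (fun p => q p.1)).map (·.2)
      = (PySem.List.sorted A (fun x => x) false).map (fun k => li.getD k []) := by
  have e : ((PySem.List.sorted li.items (fun kv => kv.1) false).filter (fun p => q p.1)).map Prod.fst
      = ((PySem.List.sorted li.items (fun kv => kv.1) false).map Prod.fst).filter q := by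
    simpa using
      (List.filter_map (f := Prod.fst) (p := q)
        (l := PySem.List.sorted li.items (fun kv => kv.1) false)).symm
  have hsorted : PySem.List.sorted A (fun x => x) false
      = ((PySem.List.sorted li.items (fun kv => kv.1) false).filter (fun p => q p.1)).map Prod.fst := by
    apply PySem.List.sorted_eq_of_perm_of_pairwise_lt
    · rw [e]
      refine ((pvSortedItemsFstPerm li).filter q).trans ?_
      refine (List.perm_ext_iff_of_nodup (hnd.filter q) hA).mpr ?_
      intro x
      simp [List.mem_filter, hmem]
    · rw [e]
      exact List.Pairwise.sublist List.filter_sublist (pvSortedItemsPairwise li hnd)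
  rw [hsorted, List.map_map]
  apply List.map_congr_left
  intro p hp
  have hpi : p ∈ li.items :=
    (PySem.List.sorted_perm li.items (fun kv => kv.1) false).subset (List.mem_of_mem_filter hp)
  rw [PySem.Dict.items_eq_map_keys li hnd []] at hpi
  obtain ⟨k, _, hk⟩ := List.mem_map.mp hpi
  simp [← hk]

-- ===== VERDICT (by name: the statement is the Claim_ definition above) =====
theorem diff_by_field_spec : Claim_equal_diff_by_field := by
  intro left right key _
  unfold Spec_diff_by_field diff_by_field diff_by_field_alt
  dsimp only
  set li := pvBuildIndex left key with hli
  set ri := pvBuildIndex right key with hri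
  have hndl : li.keys.Nodup := pvNodupKeys left key
  have hndr : ri.keys.Nodup := pvNodupKeys right key
  rw [pvMergeSpec _ _ (pvSortedItemsPairwise li hndl) (pvSortedItemsPairwise ri hndr)]
  have hmemL : ∀ k, (k ∈ ((PySem.List.sorted li.items (fun kv => kv.1) false).map Prod.fst)) ↔ k ∈ li.keys :=
    fun k => (pvSortedItemsFstPerm li).mem_iff
  have hmemR : ∀ k, (k ∈ ((PySem.List.sorted ri.items (fun kv => kv.1) false).map Prod.fst)) ↔ k ∈ ri.keys :=
    fun k => (pvSortedItemsFstPerm ri).mem_iff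
  have h1 := pvBucket li hndl
    (fun k => decide (k ∉ (PySem.List.sorted ri.items (fun kv => kv.1) false).map Prod.fst))
    (PySem.Set.diff (PySem.Set.ofList li.keys) (PySem.Set.ofList ri.keys))
    (PySem.Set.nodup_diff _ _ (PySem.Set.nodup_ofList _))
    (by intro k; simp [PySem.Set.mem_diff, PySem.Set.mem_ofList, hmemR k])
  have h2 := pvBucket ri hndr
    (fun k => decide (k ∉ (PySem.List.sorted li.items (fun kv => kv.1) false).map Prod.fst))
    (PySem.Set.diff (PySem.Set.ofList ri.keys) (PySem.Set.ofList li.keys))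
    (PySem.Set.nodup_diff _ _ (PySem.Set.nodup_ofList _))
    (by intro k; simp [PySem.Set.mem_diff, PySem.Set.mem_ofList, hmemL k])
  have h3 := pvBucket li hndl
    (fun k => decide (k ∈ (PySem.List.sorted ri.items (fun kv => kv.1) false).map Prod.fst))
    (PySem.Set.inter (PySem.Set.ofList li.keys) (PySem.Set.ofList ri.keys))
    (PySem.Set.nodup_inter _ _ (PySem.Set.nodup_ofList _))
    (by intro k; simp [PySem.Set.mem_inter, PySem.Set.mem_ofList, hmemR k])
  rw [h1, h2, h3]
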